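-- pv_equiv track=rewrite | github.com/KhrisCodes22/Inverted-Index | queryMapReduce.py | findDocuments
-- ===== SOURCE A (Python) =====
-- def removeDuplicates(duplicateList):
--     final_list = []
--     for num in duplicateList:
--         if num not in final_list:
--             final_list.append(num)
--     return final_list
--
-- def findDocuments(operation, listOne, listTwo):
--     newList = []
--     listOne.sort()
--     listTwo.sort()
--     i = 0
--     j = 0
--     if(operation == "and"):
--         while (i < len(listOne) and j < len(listTwo)):
--             if (listOne[i] == listTwo[j]):
--                 newList.append(listOne[i])
--                 i += 1
--                 j += 1
--             elif(listOne[i] > listTwo[j]):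
--                 j += 1
--             else:
--                 i += 1
--         return removeDuplicates(newList)
--     elif(operation == "or"):
--         while(i < len(listOne)):
--             newList.append(listOne[i])
--             i+=1
--         while(j < len(listTwo)):
--             newList.append(listTwo[j])
--             j+=1
--         newList.sort()
--         return removeDuplicates(newList)
-- ===== SOURCE B (Python) =====
-- def findDocuments(operation, listOne, listTwo):
--     # Return-value equivalent to A; B does not sort the arguments in place.
--     if operation == "and":
--         return sorted(set(listOne) & set(listTwo))
--     if operation == "or":
--         return sorted(set(listOne) | set(listTwo))
-- ===== Notes on version B (the rewrite author's own statement) =====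
-- stated objective: faster
-- what changed: replaces sort + index-based merge + quadratic list-membership dedup with hash-set intersection/union followed by one sort (adjacent-distinct by construction)
-- outside the precondition, e.g. on findDocuments('xor', [1], [2]): A returns None, B returns None
import Mathlib
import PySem

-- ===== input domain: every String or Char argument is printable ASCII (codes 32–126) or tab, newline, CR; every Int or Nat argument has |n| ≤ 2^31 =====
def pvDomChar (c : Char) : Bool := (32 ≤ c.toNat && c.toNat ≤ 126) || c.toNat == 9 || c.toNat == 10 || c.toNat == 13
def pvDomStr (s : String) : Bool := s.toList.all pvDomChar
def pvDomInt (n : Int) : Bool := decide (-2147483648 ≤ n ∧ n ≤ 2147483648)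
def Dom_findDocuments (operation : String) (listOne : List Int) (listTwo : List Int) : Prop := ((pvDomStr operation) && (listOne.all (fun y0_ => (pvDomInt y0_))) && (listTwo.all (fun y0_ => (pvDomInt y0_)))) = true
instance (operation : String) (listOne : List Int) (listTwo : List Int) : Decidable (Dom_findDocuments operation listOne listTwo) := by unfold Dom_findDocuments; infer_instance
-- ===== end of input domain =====

-- B replaces A's sort + index merge + quadratic membership dedup by set intersection/union plus one
-- sort (asymptotically faster); equivalence is about the RETURN value only (A sorts its list
-- arguments in place, B does not mutate them).


-- ===== PORT A =====
-- removeDuplicates: keep first occurrences, appending to final_list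
def removeDuplicates (duplicateList : List Int) : List Int :=
  duplicateList.foldl (fun final_list num => if num ∈ final_list then final_list else final_list ++ [num]) []

-- the "and" while loop over indices i, j, as structural recursion on the remaining suffixes
def andLoop : List Int → List Int → List Int
  | a :: as, b :: bs =>
      if a = b then a :: andLoop as bs
      else if a > b then andLoop (a :: as) bs
      else andLoop as (b :: bs)
  | _, _ => []
termination_by l1 l2 => l1.length + l2.length

def findDocuments (operation : String) (listOne : List Int) (listTwo : List Int) : List Int :=
  let l1 := PySem.List.sorted listOne (fun x => x) false
  let l2 := PySem.List.sorted listTwo (fun x => x) false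
  if operation == "and" then
    removeDuplicates (andLoop l1 l2)
  else if operation == "or" then
    -- the two while loops copy l1 then l2 into newList
    removeDuplicates (PySem.List.sorted (l1 ++ l2) (fun x => x) false)
  else []  -- Python A falls off the end and returns None here (excluded by Pre_)

-- ===== PORT B =====
def findDocuments_alt (operation : String) (listOne : List Int) (listTwo : List Int) : List Int :=
  if operation == "and" then
    PySem.List.sorted (PySem.Set.inter (PySem.Set.ofList listOne) (PySem.Set.ofList listTwo)) (fun x => x) false
  else if operation == "or" then
    PySem.List.sorted (PySem.Set.union (PySem.Set.ofList listOne) (PySem.Set.ofList listTwo)) (fun x => x) false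
  else []  -- Python B falls off the end and returns None here (excluded by Pre_)

-- ===== PRECONDITION & SPEC =====
-- Pre_ excludes operations other than "and"/"or", on which A returns None instead of a list.
def Pre_findDocuments (operation : String) (listOne : List Int) (listTwo : List Int) : Prop :=
  operation = "and" ∨ operation = "or"
instance (operation : String) (listOne : List Int) (listTwo : List Int) : Decidable (Pre_findDocuments operation listOne listTwo) := by unfold Pre_findDocuments; infer_instance

def pvWitness_findDocuments : String × List Int × List Int := ("and", [3, 1, 3, 2], [2, 3, 5])

def Spec_findDocuments (operation : String) (listOne : List Int) (listTwo : List Int) (out : List Int) : Prop := out = findDocuments_alt operation listOne listTwo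
instance (operation : String) (listOne : List Int) (listTwo : List Int) (out : List Int) : Decidable (Spec_findDocuments operation listOne listTwo out) := by unfold Spec_findDocuments; infer_instance

-- ===== CLAIM (what is proved, stated in full; the proofs are below) =====
def Claim_equal_findDocuments : Prop := ∀ (operation : String) (listOne : List Int) (listTwo : List Int), Dom_findDocuments operation listOne listTwo → Pre_findDocuments operation listOne listTwo → Spec_findDocuments operation listOne listTwo (findDocuments operation listOne listTwo)

-- ===== LEMMAS AND PROOFS =====

-- removeDuplicates: the foldl with accumulator acc returns acc ++ s for some sublist s of the input
theorem rd_go_sublist (l acc : List Int) :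
    ∃ s, l.foldl (fun fl num => if num ∈ fl then fl else fl ++ [num]) acc = acc ++ s ∧ s.Sublist l := by
  induction l generalizing acc with
  | nil => exact ⟨[], by simp⟩
  | cons num t ih =>
    simp only [List.foldl_cons]
    by_cases h : num ∈ acc
    · obtain ⟨s, hs, hsub⟩ := ih acc
      exact ⟨s, by simp [h, hs], hsub.cons _⟩
    · obtain ⟨s, hs, hsub⟩ := ih (acc ++ [num])
      exact ⟨num :: s, by simp [h, hs], hsub.cons₂ _⟩

theorem rd_go_mem (l acc : List Int) (x : Int) :
    x ∈ l.foldl (fun fl num => if num ∈ fl then fl else fl ++ [num]) acc ↔ x ∈ acc ∨ x ∈ l := by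
  induction l generalizing acc with
  | nil => simp
  | cons num t ih =>
    simp only [List.foldl_cons]
    by_cases h : num ∈ acc
    · rw [if_pos h, ih]
      constructor
      · rintro (ha | ht)
        · exact Or.inl ha
        · exact Or.inr (List.mem_cons_of_mem _ ht)
      · rintro (ha | hnt)
        · exact Or.inl ha
        · rcases List.mem_cons.mp hnt with rfl | ht
          · exact Or.inl h
          · exact Or.inr ht
    · rw [if_neg h, ih]
      simp [or_assoc]

theorem rd_go_nodup (l acc : List Int) (hacc : acc.Nodup) :
    (l.foldl (fun fl num => if num ∈ fl then fl else fl ++ [num]) acc).Nodup := by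
  induction l generalizing acc with
  | nil => simpa
  | cons num t ih =>
    simp only [List.foldl_cons]
    by_cases h : num ∈ acc
    · rw [if_pos h]; exact ih acc hacc
    · rw [if_neg h]
      refine ih _ ?_
      simp only [List.nodup_append, List.nodup_singleton, true_and, and_true,
        List.disjoint_singleton, List.nodup_cons, List.not_mem_nil, not_false_iff, hacc]
      refine ⟨List.nodup_nil, ?_⟩
      intro a ha b hb
      rw [List.mem_singleton] at hb
      subst hb
      intro hab
      exact h (hab ▸ ha)

theorem rd_mem (l : List Int) (x : Int) : x ∈ removeDuplicates l ↔ x ∈ l := by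
  unfold removeDuplicates; rw [rd_go_mem]; simp

theorem rd_nodup (l : List Int) : (removeDuplicates l).Nodup := rd_go_nodup l [] (by simp)

theorem rd_sublist (l : List Int) : (removeDuplicates l).Sublist l := by
  unfold removeDuplicates
  obtain ⟨s, hs, hsub⟩ := rd_go_sublist l []
  rw [hs]; simpa using hsub

theorem andLoop_sublist (l1 l2 : List Int) : (andLoop l1 l2).Sublist l1 := by
  induction l1, l2 using andLoop.induct with
  | case1 as b bs ih => rw [andLoop, if_pos rfl]; exact ih.cons₂ _
  | case2 a as b bs hne hgt ih => rw [andLoop, if_neg hne, if_pos hgt]; exact ih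
  | case3 a as b bs hne hgt ih => rw [andLoop, if_neg hne, if_neg hgt]; exact ih.cons _
  | case4 x y h =>
    rcases x with _ | ⟨a, as⟩
    · simp [andLoop]
    · rcases y with _ | ⟨b, bs⟩
      · simp [andLoop]
      · exact (h a as b bs rfl rfl).elim

theorem andLoop_mem (l1 l2 : List Int) (h1 : l1.Pairwise (· ≤ ·)) (h2 : l2.Pairwise (· ≤ ·))
    (x : Int) : x ∈ andLoop l1 l2 ↔ x ∈ l1 ∧ x ∈ l2 := by
  induction l1, l2 using andLoop.induct with
  | case1 as b bs ih =>
    rw [andLoop, if_pos rfl]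
    rw [List.pairwise_cons] at h1 h2
    rw [List.mem_cons, ih h1.2 h2.2]
    constructor
    · rintro (rfl | ⟨ha, hb⟩) <;> simp_all
    · rintro ⟨h1x, h2x⟩
      rcases List.mem_cons.mp h1x with rfl | ha
      · exact Or.inl rfl
      · rcases List.mem_cons.mp h2x with rfl | hb
        · exact Or.inl rfl
        · exact Or.inr ⟨ha, hb⟩
  | case2 a as b bs hne hgt ih =>
    rw [andLoop, if_neg hne, if_pos hgt]
    rw [List.pairwise_cons] at h2
    rw [ih h1 h2.2]
    constructor
    · rintro ⟨ha, hb⟩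
      exact ⟨ha, List.mem_cons_of_mem _ hb⟩
    · rintro ⟨ha, hb⟩
      rcases List.mem_cons.mp hb with rfl | hb'
      · exfalso
        rcases List.mem_cons.mp ha with rfl | ha'
        · omega
        · have := (List.pairwise_cons.mp h1).1 x ha'; omega
      · exact ⟨ha, hb'⟩
  | case3 a as b bs hne hgt ih =>
    rw [andLoop, if_neg hne, if_neg hgt]
    rw [List.pairwise_cons] at h1
    rw [ih h1.2 h2]
    constructor
    · rintro ⟨ha, hb⟩
      exact ⟨List.mem_cons_of_mem _ ha, hb⟩
    · rintro ⟨ha, hb⟩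
      rcases List.mem_cons.mp ha with rfl | ha'
      · exfalso
        rcases List.mem_cons.mp hb with rfl | hb'
        · omega
        · have := (List.pairwise_cons.mp h2).1 x hb'; omega
      · exact ⟨ha', hb⟩
  | case4 y z h =>
    rcases y with _ | ⟨a, as⟩
    · simp [andLoop]
    · rcases z with _ | ⟨b, bs⟩
      · simp [andLoop]
      · exact (h a as b bs rfl rfl).elim

-- Nodup + Pairwise ≤ gives Pairwise <
theorem pairwise_lt_of_nodup_le (l : List Int) (hn : l.Nodup) (hle : l.Pairwise (· ≤ ·)) :
    l.Pairwise (· < ·) :=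
  (hn.and hle).imp (fun h => lt_of_le_of_ne h.2 h.1)

-- main characterisation: removeDuplicates of a ≤-sorted list equals sorted of any nodup list
-- with the same membership
theorem rd_eq_sorted (l s : List Int) (hle : l.Pairwise (· ≤ ·)) (hns : s.Nodup)
    (hmem : ∀ x, x ∈ l ↔ x ∈ s) :
    removeDuplicates l = PySem.List.sorted s (fun x => x) false := by
  have hnd := rd_nodup l
  have hp : (removeDuplicates l).Pairwise (· < ·) :=
    pairwise_lt_of_nodup_le _ hnd (List.Pairwise.sublist (rd_sublist l) hle)
  have hperm : (removeDuplicates l).Perm s := by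
    rw [List.perm_ext_iff_of_nodup hnd hns]
    intro x; rw [rd_mem, hmem]
  exact (PySem.List.sorted_eq_of_perm_of_pairwise_lt _ _ (fun x => x) hperm hp).symm

-- ===== VERDICT (by name: the statement is the Claim_ definition above) =====
theorem findDocuments_spec : Claim_equal_findDocuments := by
  intro operation listOne listTwo _ hpre
  unfold Spec_findDocuments findDocuments findDocuments_alt
  rcases hpre with rfl | rfl
  · rw [if_pos (show (("and" : String) == "and") = true from rfl),
      if_pos (show (("and" : String) == "and") = true from rfl)]
    apply rd_eq_sorted
    · exact List.Pairwise.sublist (andLoop_sublist _ _) (PySem.List.sorted_pairwise ..)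
    · exact PySem.Set.nodup_inter _ _ (PySem.Set.nodup_ofList _)
    · intro x
      rw [andLoop_mem _ _ (PySem.List.sorted_pairwise ..) (PySem.List.sorted_pairwise ..),
        PySem.Set.mem_inter, PySem.Set.mem_ofList, PySem.Set.mem_ofList,
        PySem.List.mem_sorted, PySem.List.mem_sorted]
  · rw [if_neg (show ¬ (("or" : String) == "and") = true by decide),
      if_neg (show ¬ (("or" : String) == "and") = true by decide),
      if_pos (show (("or" : String) == "or") = true from rfl),
      if_pos (show (("or" : String) == "or") = true from rfl)]
    apply rd_eq_sorted
    · exact PySem.List.sorted_pairwise ..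
    · exact PySem.Set.nodup_union _ _ (PySem.Set.nodup_ofList _)
    · intro x
      rw [PySem.List.mem_sorted, List.mem_append, PySem.Set.mem_union,
        PySem.Set.mem_ofList, PySem.Set.mem_ofList, PySem.List.mem_sorted, PySem.List.mem_sorted]
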